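-- pv_equiv track=rewrite | github.com/changpil/pyPractice | CodingInterviews/PatternsForCodingInterviews/Pattern12:BitwiseXOR/ProblemStatement.py | flip_and_invert_image_inplace
-- ===== SOURCE A (Python) =====
-- def flip_and_invert_image_inplace(matrix):
--   for i in range(len(matrix)):
--       start, end  = 0, len(matrix) -1
--
--       for j in range(0, (len(matrix)-1)//2 +1):
--             jstart, jend  = start + j, end - j
--             if jstart != jend:
--                 matrix[i][jstart], matrix[i][jend] = matrix[i][jend] ^ 1, matrix[i][jstart] ^ 1
--             else:
--                 matrix[i][jstart] = matrix[i][jstart] ^ 1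
--   return matrix
-- ===== SOURCE B (Python) =====
-- def flip_and_invert_image_inplace(matrix):
--     n = len(matrix)
--     for row in matrix:
--         row[:n] = [x ^ 1 for x in reversed(row[:n])]
--     return matrix
-- ===== Notes on version B (the rewrite author's own statement) =====
-- stated objective: simpler
-- what changed: A's index-based meet-in-the-middle loop that swaps and xors pairs within each row's first len(matrix) entries is replaced by a single per-row slice assignment that reverses the length-n prefix and xors each entry via one comprehension.
import Mathlib
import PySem

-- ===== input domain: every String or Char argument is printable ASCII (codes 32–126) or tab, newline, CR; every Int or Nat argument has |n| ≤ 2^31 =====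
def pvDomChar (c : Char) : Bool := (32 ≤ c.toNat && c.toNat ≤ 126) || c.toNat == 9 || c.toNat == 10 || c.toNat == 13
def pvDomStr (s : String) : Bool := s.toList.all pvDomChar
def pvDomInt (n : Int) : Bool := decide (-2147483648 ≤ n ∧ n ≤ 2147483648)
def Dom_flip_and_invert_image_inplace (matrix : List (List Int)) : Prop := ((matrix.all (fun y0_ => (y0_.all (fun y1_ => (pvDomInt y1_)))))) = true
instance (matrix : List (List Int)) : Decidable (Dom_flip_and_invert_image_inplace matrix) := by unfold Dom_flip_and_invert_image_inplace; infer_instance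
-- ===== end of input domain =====

-- B replaces A's meet-in-the-middle swap loop over the first len(matrix) entries of each row by one
-- per-row comprehension (reverse the length-n prefix, xor each entry, splice it back); same return
-- value; both A and B mutate the argument's rows in place (the equivalence is about the return value).

-- ===== PORT A =====
def flip_and_invert_image_inplace (matrix : List (List Int)) : List (List Int) :=
  (PySem.List.pyRange 0 (matrix.length : Int) 1).foldl (fun m i =>
    let start : Int := 0
    let fin : Int := (matrix.length : Int) - 1
    (PySem.List.pyRange 0 (PySem.Int.floordiv ((matrix.length : Int) - 1) 2 + 1) 1).foldl (fun m j =>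
      let jstart := start + j
      let jend := fin - j
      let row := PySem.List.pyGetD m i []
      PySem.List.pySetD m i
        (if jstart ≠ jend then
          PySem.List.pySetD (PySem.List.pySetD row jstart (PySem.Int.bxor (PySem.List.pyGetD row jend 0) 1))
            jend (PySem.Int.bxor (PySem.List.pyGetD row jstart 0) 1)
        else
          PySem.List.pySetD row jstart (PySem.Int.bxor (PySem.List.pyGetD row jstart 0) 1))) m) matrix

-- ===== PORT B =====
-- Source B:  row[:n] = [x ^ 1 for x in reversed(row[:n])]   (slice assignment: new prefix ++ untouched tail)
def flip_and_invert_image_inplace_alt (matrix : List (List Int)) : List (List Int) :=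
  let n := matrix.length
  matrix.map (fun row =>
    ((PySem.List.slice row none (some (n : Int))).reverse.map (fun x => PySem.Int.bxor x 1))
      ++ PySem.List.slice row (some (n : Int)) none)

-- ===== PRECONDITION & SPEC =====
-- A raises IndexError when some row is shorter than len(matrix); Pre_ excludes exactly those inputs.
def Pre_flip_and_invert_image_inplace (matrix : List (List Int)) : Prop :=
  ∀ row ∈ matrix, matrix.length ≤ row.length
instance (matrix : List (List Int)) : Decidable (Pre_flip_and_invert_image_inplace matrix) := by
  unfold Pre_flip_and_invert_image_inplace; infer_instance

def pvWitness_flip_and_invert_image_inplace : List (List Int) := [[1, 0], [0, 1]]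

def Spec_flip_and_invert_image_inplace (matrix : List (List Int)) (out : List (List Int)) : Prop :=
  out = flip_and_invert_image_inplace_alt matrix
instance (matrix : List (List Int)) (out : List (List Int)) : Decidable (Spec_flip_and_invert_image_inplace matrix out) := by unfold Spec_flip_and_invert_image_inplace; infer_instance

-- ===== CLAIM (what is proved, stated in full; the proofs are below) =====
def Claim_equal_flip_and_invert_image_inplace : Prop := ∀ (matrix : List (List Int)), Dom_flip_and_invert_image_inplace matrix → Pre_flip_and_invert_image_inplace matrix → Spec_flip_and_invert_image_inplace matrix (flip_and_invert_image_inplace matrix)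

-- ===== LEMMAS AND PROOFS =====

-- the per-row transform (what B computes for each row)
def pvRowF (n : Nat) (row : List Int) : List Int :=
  (row.take n).reverse.map (fun x => PySem.Int.bxor x 1) ++ row.drop n

-- A's inner-loop body, expressed as a function of the current row value
def pvInnerBody (n : Nat) (row : List Int) (j : Int) : List Int :=
  if j ≠ ((n : Int) - 1 - j) then
    PySem.List.pySetD (PySem.List.pySetD row j (PySem.Int.bxor (PySem.List.pyGetD row ((n : Int) - 1 - j) 0) 1))
      ((n : Int) - 1 - j) (PySem.Int.bxor (PySem.List.pyGetD row j 0) 1)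
  else
    PySem.List.pySetD row j (PySem.Int.bxor (PySem.List.pyGetD row j 0) 1)

-- a fold that only reads and writes index i of the state is a single pointwise update
theorem pv_fold_row (n : Nat) (js : List Int) (i : Nat) :
    ∀ (m : List (List Int)) (hi : i < m.length),
    js.foldl (fun (m : List (List Int)) (j : Int) =>
      PySem.List.pySetD m (i : Int)
        (if j ≠ ((n : Int) - 1 - j) then
          PySem.List.pySetD (PySem.List.pySetD (PySem.List.pyGetD m (i : Int) []) j
              (PySem.Int.bxor (PySem.List.pyGetD (PySem.List.pyGetD m (i : Int) []) ((n : Int) - 1 - j) 0) 1))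
            ((n : Int) - 1 - j) (PySem.Int.bxor (PySem.List.pyGetD (PySem.List.pyGetD m (i : Int) []) j 0) 1)
        else
          PySem.List.pySetD (PySem.List.pyGetD m (i : Int) []) j
            (PySem.Int.bxor (PySem.List.pyGetD (PySem.List.pyGetD m (i : Int) []) j 0) 1))) m
      = m.set i (js.foldl (pvInnerBody n) (m[i]'hi)) := by
  induction js with
  | nil => intro m hi; simp
  | cons j js ih =>
    intro m hi
    simp only [List.foldl_cons]
    have hrow : PySem.List.pyGetD m (i : Int) ([] : List Int) = m[i]'hi := by
      rw [PySem.List.pyGetD_natCast]; exact List.getD_eq_getElem m [] hi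
    rw [hrow, PySem.List.pySetD_natCast,
      ih _ (by rw [List.length_set]; exact hi),
      List.getElem_set_self, List.set_set]
    simp only [pvInnerBody]

-- invariant of A's meet-in-the-middle loop on one row
theorem pv_inner_inv (n : Nat) (row : List Int) (hn : n ≤ row.length) (hn1 : 1 ≤ n) :
    ∀ (t : Nat), t ≤ (n - 1) / 2 + 1 →
      (((List.range t).map (fun (k : Nat) => (k : Int))).foldl (pvInnerBody n) row).length = row.length ∧
      ∀ (p : Nat) (hp : p < row.length),
        (((List.range t).map (fun (k : Nat) => (k : Int))).foldl (pvInnerBody n) row)[p]? =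
          some (if p < t ∨ (n - t ≤ p ∧ p < n)
                then PySem.Int.bxor (row[n - 1 - p]'(by omega)) 1
                else row[p]'hp) := by
  intro t
  induction t with
  | zero =>
    intro _
    refine ⟨by simp, ?_⟩
    intro p hp
    simp only [List.range_zero, List.map_nil, List.foldl_nil]
    rw [List.getElem?_eq_getElem hp, if_neg (by omega)]
  | succ t ih =>
    intro ht
    obtain ⟨hlen, hget⟩ := ih (by omega)
    have h2t : 2 * t ≤ n - 1 := by omega
    rw [List.range_succ, List.map_append]
    simp only [List.map_cons, List.map_nil, List.foldl_append, List.foldl_cons, List.foldl_nil]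
    set st := ((List.range t).map (fun (k : Nat) => (k : Int))).foldl (pvInnerBody n) row with hst
    have hcast : ((n : Int) - 1 - (t : Int)) = ((n - 1 - t : Nat) : Int) := by omega
    have hstt : st[t]? = some (row[t]'(by omega)) := by
      have h := hget t (by omega)
      rwa [if_neg (by omega)] at h
    have hste : st[n - 1 - t]? = some (row[n - 1 - t]'(by omega)) := by
      have h := hget (n - 1 - t) (by omega)
      rwa [if_neg (by omega)] at h
    have hgetDt : st.getD t 0 = row[t]'(by omega) := by
      rw [List.getD_eq_getElem?_getD, hstt]; rfl
    have hgetDe : st.getD (n - 1 - t) 0 = row[n - 1 - t]'(by omega) := by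
      rw [List.getD_eq_getElem?_getD, hste]; rfl
    unfold pvInnerBody
    rw [hcast]
    by_cases hodd : 2 * t = n - 1
    · -- middle element: jstart = jend
      rw [if_neg (show ¬((t : Int) ≠ ((n - 1 - t : Nat) : Int)) by omega)]
      rw [PySem.List.pyGetD_natCast, hgetDt, PySem.List.pySetD_natCast]
      refine ⟨by simp [hlen], ?_⟩
      intro p hp
      rcases eq_or_ne p t with rfl | hp2
      · rw [List.getElem?_set_self (by omega), if_pos (by omega)]
        have hpt : n - 1 - p = p := by omega
        simp [hpt]
      · rw [List.getElem?_set_ne (by omega), hget p hp]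
        by_cases hc : p < t ∨ (n - t ≤ p ∧ p < n)
        · rw [if_pos hc, if_pos (by omega)]
        · rw [if_neg hc, if_neg (by omega)]
    · -- genuine swap: jstart ≠ jend
      rw [if_pos (show (t : Int) ≠ ((n - 1 - t : Nat) : Int) by omega)]
      simp only [PySem.List.pyGetD_natCast, PySem.List.pySetD_natCast]
      rw [hgetDt, hgetDe]
      refine ⟨by simp [hlen], ?_⟩
      intro p hp
      rcases eq_or_ne p (n - 1 - t) with rfl | hp1
      · rw [List.getElem?_set_self (by simp; omega), if_pos (by omega)]
        have hpt : n - 1 - (n - 1 - t) = t := by omega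
        simp [hpt]
      · rw [List.getElem?_set_ne (by omega)]
        rcases eq_or_ne p t with rfl | hp2
        · rw [List.getElem?_set_self (by omega), if_pos (by omega)]
        · rw [List.getElem?_set_ne (by omega), hget p hp]
          by_cases hc : p < t ∨ (n - t ≤ p ∧ p < n)
          · rw [if_pos hc, if_pos (by omega)]
          · rw [if_neg hc, if_neg (by omega)]

-- A's inner loop computes the per-row transform
theorem pv_inner_eq (n : Nat) (row : List Int) (hn : n ≤ row.length) (hn1 : 1 ≤ n) :
    (PySem.List.pyRange 0 (PySem.Int.floordiv ((n : Int) - 1) 2 + 1) 1).foldl (pvInnerBody n) row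
      = pvRowF n row := by
  have hb : PySem.Int.floordiv ((n : Int) - 1) 2 + 1 = (((n - 1) / 2 + 1 : Nat) : Int) := by
    rw [PySem.Int.floordiv_eq_ediv_of_pos (by norm_num)]; omega
  rw [hb, PySem.List.pyRange_zero_natCast]
  obtain ⟨hlen, hget⟩ := pv_inner_inv n row hn hn1 ((n - 1) / 2 + 1) le_rfl
  have hlenF : (pvRowF n row).length = row.length := by
    simp [pvRowF]; omega
  apply List.ext_getElem (by omega)
  intro p h1 h2
  have hp : p < row.length := by omega
  have h := hget p hp
  rw [List.getElem?_eq_getElem (by omega)] at h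
  have hval := Option.some.inj h
  rw [hval]
  by_cases hpn : p < n
  · rw [if_pos (by omega)]
    have hplen : p < ((row.take n).reverse.map (fun x => PySem.Int.bxor x 1)).length := by
      simp; omega
    simp only [pvRowF]
    rw [List.getElem_append_left hplen, List.getElem_map, List.getElem_reverse,
      List.getElem_take]
    simp only [List.length_take, Nat.min_eq_left hn]
  · rw [if_neg (by omega)]
    have hplen : ((row.take n).reverse.map (fun x => PySem.Int.bxor x 1)).length ≤ p := by
      simp; omega
    simp only [pvRowF]
    rw [List.getElem_append_right hplen, List.getElem_drop]
    congr 1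
    simp only [List.length_map, List.length_reverse, List.length_take, Nat.min_eq_left hn]
    omega

-- A's outer loop maps the per-row transform over the processed prefix
theorem pv_outer_inv (matrix : List (List Int))
    (hpre : ∀ row ∈ matrix, matrix.length ≤ row.length) :
    ∀ (k : Nat), k ≤ matrix.length →
    (List.range k).foldl (fun (m : List (List Int)) (i : Nat) =>
      (PySem.List.pyRange 0 (PySem.Int.floordiv ((matrix.length : Int) - 1) 2 + 1) 1).foldl
        (fun (m : List (List Int)) (j : Int) =>
          PySem.List.pySetD m (i : Int)
            (if j ≠ ((matrix.length : Int) - 1 - j) then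
              PySem.List.pySetD (PySem.List.pySetD (PySem.List.pyGetD m (i : Int) []) j
                  (PySem.Int.bxor (PySem.List.pyGetD (PySem.List.pyGetD m (i : Int) []) ((matrix.length : Int) - 1 - j) 0) 1))
                ((matrix.length : Int) - 1 - j) (PySem.Int.bxor (PySem.List.pyGetD (PySem.List.pyGetD m (i : Int) []) j 0) 1)
            else
              PySem.List.pySetD (PySem.List.pyGetD m (i : Int) []) j
                (PySem.Int.bxor (PySem.List.pyGetD (PySem.List.pyGetD m (i : Int) []) j 0) 1))) m) matrix
    = (matrix.take k).map (pvRowF matrix.length) ++ matrix.drop k := by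
  intro k
  induction k with
  | zero => intro _; simp
  | succ k ih =>
    intro hk
    rw [List.range_succ, List.foldl_append, ih (by omega), List.foldl_cons, List.foldl_nil]
    set st := (matrix.take k).map (pvRowF matrix.length) ++ matrix.drop k with hst
    have hkl : k < matrix.length := by omega
    have hpref : ((matrix.take k).map (pvRowF matrix.length)).length = k := by
      simp; omega
    have hstlen : st.length = matrix.length := by
      rw [hst]; simp; omega
    have h1 : st[k]? = some (matrix[k]'hkl) := by
      rw [hst, List.getElem?_append_right (by omega), hpref, Nat.sub_self,
        List.drop_eq_getElem_cons hkl, List.getElem?_cons_zero]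
    have hstk : st[k]'(by omega) = matrix[k]'hkl := by
      rw [List.getElem?_eq_getElem (by omega)] at h1
      exact Option.some.inj h1
    rw [pv_fold_row matrix.length _ k st (by omega), hstk,
      pv_inner_eq matrix.length (matrix[k]'hkl) (hpre _ (List.getElem_mem hkl)) (by omega)]
    rw [hst, List.set_append, hpref, if_neg (by omega), Nat.sub_self,
      List.drop_eq_getElem_cons hkl, List.set_cons_zero,
      List.take_add_one, List.getElem?_eq_getElem hkl]
    simp only [Option.toList_some, List.map_append, List.map_cons, List.map_nil,
      List.append_assoc, List.singleton_append]

-- ===== VERDICT (by name: the statement is the Claim_ definition above) =====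
theorem flip_and_invert_image_inplace_spec : Claim_equal_flip_and_invert_image_inplace := by
  intro matrix _ hpre
  unfold Spec_flip_and_invert_image_inplace
  simp only [flip_and_invert_image_inplace, zero_add]
  rw [PySem.List.pyRange_zero_natCast, List.foldl_map,
    pv_outer_inv matrix hpre matrix.length le_rfl,
    List.take_length, List.drop_length, List.append_nil]
  simp only [flip_and_invert_image_inplace_alt, PySem.List.slice_to_natCast,
    PySem.List.slice_from_natCast]
  exact List.map_congr_left (fun row _ => rfl)
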